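-- pv_equiv track=rewrite | github.com/Nachobt98/sopa_libros | wordsearch/parsing/thematic.py | _parse_block_block
-- ===== SOURCE A (Python) =====
-- def _parse_block_block(block_lines: list[str], index: int) -> tuple[str, str | None]:
--     """Parse one [Block] ... [/Block] section."""
--     name: str | None = None
--     background: str | None = None
--
--     for raw in block_lines:
--         line = raw.strip()
--         if not line:
--             continue
--         lower = line.lower()
--         if lower.startswith("name:"):
--             name = line.split(":", 1)[1].strip()
--         elif lower.startswith("background:"):
--             background = line.split(":", 1)[1].strip()
--
--     if not name:
--         name = f"Block {index}"
--
--     return name, background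
-- ===== SOURCE B (Python) =====
-- def _parse_block_block(block_lines: list[str], index: int) -> tuple[str, str | None]:
--     """Parse one [Block] ... [/Block] section (field-dict formulation)."""
--     fields: dict[str, str] = {}
--     for raw in block_lines:
--         line = raw.strip()
--         if not line or ":" not in line:
--             continue
--         key, value = line.split(":", 1)
--         fields[key.lower()] = value.strip()
--     name = fields.get("name")
--     background = fields.get("background")
--     if not name:
--         name = f"Block {index}"
--     return name, background
-- ===== Notes on version B (the rewrite author's own statement) =====
-- stated objective: idiomatic
-- what changed: Replaces A's two hard-coded startswith branches and per-field accumulator variables with a single generic pass that builds a key->value dict from every 'key:value' line (last wins) and reads 'name'/'background' out of it afterwards.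
import Mathlib
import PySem

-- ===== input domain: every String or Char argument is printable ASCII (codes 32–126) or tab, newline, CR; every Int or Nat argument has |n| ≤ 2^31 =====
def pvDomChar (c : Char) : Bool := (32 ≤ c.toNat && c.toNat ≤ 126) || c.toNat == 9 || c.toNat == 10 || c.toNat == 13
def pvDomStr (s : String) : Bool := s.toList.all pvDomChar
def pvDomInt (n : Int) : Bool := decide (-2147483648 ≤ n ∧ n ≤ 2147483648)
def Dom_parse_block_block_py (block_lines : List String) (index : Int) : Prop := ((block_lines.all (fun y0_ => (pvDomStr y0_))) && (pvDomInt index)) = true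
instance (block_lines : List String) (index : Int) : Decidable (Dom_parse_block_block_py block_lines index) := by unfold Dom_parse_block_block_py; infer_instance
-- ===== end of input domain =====

-- B replaces A's two hard-coded startswith branches and per-field accumulators with one generic
-- key:value-dict pass read afterwards (objective: idiomatic; same cost).

-- ===== PORT A =====
-- loop body of A's for-loop (one named helper per loop, transliterated line by line)
def pvStepA (st : Option String × Option String) (raw : String) : Option String × Option String :=
  let line := PySem.Str.strip raw
  if line = "" then st
  else
    let lower := PySem.Str.lower line
    if PySem.Str.startswith lower "name:" then
      -- line.split(":", 1)[1]: index 1 exists because the startswith guard guarantees a ':' in line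
      (some (PySem.Str.strip ((PySem.List.pyGet? ((PySem.Str.splitMax? line ":" 1).getD []) 1).getD "")), st.2)
    else if PySem.Str.startswith lower "background:" then
      (st.1, some (PySem.Str.strip ((PySem.List.pyGet? ((PySem.Str.splitMax? line ":" 1).getD []) 1).getD "")))
    else st

def parse_block_block_py (block_lines : List String) (index : Int) : String × Option String :=
  let st := block_lines.foldl pvStepA (none, none)
  let name : String :=
    match st.1 with
    | none => "Block " ++ PySem.Int.toStr index
    | some s => if s = "" then "Block " ++ PySem.Int.toStr index else s
  (name, st.2)

-- ===== PORT B =====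
-- loop body of B's for-loop
def pvStepB (d : PySem.Dict String String) (raw : String) : PySem.Dict String String :=
  let line := PySem.Str.strip raw
  if line = "" then d
  else if PySem.Str.isIn ":" line = false then d
  else
    let parts := (PySem.Str.splitMax? line ":" 1).getD []
    d.insert (PySem.Str.lower ((PySem.List.pyGet? parts 0).getD ""))
             (PySem.Str.strip ((PySem.List.pyGet? parts 1).getD ""))

def parse_block_block_py_alt (block_lines : List String) (index : Int) : String × Option String :=
  let fields := block_lines.foldl pvStepB PySem.Dict.empty
  let name? := fields.get? "name"
  let background := fields.get? "background"
  let name : String :=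
    match name? with
    | none => "Block " ++ PySem.Int.toStr index
    | some s => if s = "" then "Block " ++ PySem.Int.toStr index else s
  (name, background)

-- ===== PRECONDITION & SPEC =====
def Spec_parse_block_block_py (block_lines : List String) (index : Int) (out : String × Option String) : Prop := out = parse_block_block_py_alt block_lines index
instance (block_lines : List String) (index : Int) (out : String × Option String) : Decidable (Spec_parse_block_block_py block_lines index out) := by unfold Spec_parse_block_block_py; infer_instance

-- ===== CLAIM (what is proved, stated in full; the proofs are below) =====
def Claim_equal_parse_block_block_py : Prop := ∀ (block_lines : List String) (index : Int), Dom_parse_block_block_py block_lines index → Spec_parse_block_block_py block_lines index (parse_block_block_py block_lines index)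

-- ===== LEMMAS AND PROOFS =====

theorem pvToNat_ofNat (n : Nat) (h : Nat.isValidChar n) : (Char.ofNat n).toNat = n := by
  simp [Char.ofNat, h, Char.toNat, Char.ofNatAux]

theorem pvLowerChar_eq_colon {c : Char} (h : PySem.Chars.lowerChar c = ':') : c = ':' := by
  unfold PySem.Chars.lowerChar PySem.Chars.isupper at h
  split_ifs at h with hc
  · exfalso
    simp only [Bool.and_eq_true, decide_eq_true_eq] at hc
    obtain ⟨ha, hz⟩ := hc
    rw [Char.le_def] at ha hz
    have h1 : (65 : Nat) ≤ c.toNat := ha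
    have h2 : c.toNat ≤ 90 := hz
    have hv : Nat.isValidChar (c.toNat + 32) := by left; omega
    have hto := congrArg Char.toNat h
    rw [pvToNat_ofNat _ hv] at hto
    have h58 : (':' : Char).toNat = 58 := by decide
    omega
  · exact h

theorem pvColon_mem_lower {l : List Char} : ':' ∈ PySem.Chars.lower l ↔ ':' ∈ l := by
  unfold PySem.Chars.lower
  constructor
  · intro h
    obtain ⟨c, hc, he⟩ := List.mem_map.mp h
    exact (pvLowerChar_eq_colon he) ▸ hc
  · intro h
    exact List.mem_map.mpr ⟨':', h, rfl⟩

theorem pvSplit_first {l : List Char} (h : ':' ∈ l) :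
    ∃ u v, l = u ++ ':' :: v ∧ ':' ∉ u := by
  induction l with
  | nil => cases h
  | cons c rest ih =>
    by_cases hc : c = ':'
    · exact ⟨[], rest, by simp [hc], by simp⟩
    · have hm : ':' ∈ rest := by
        cases List.mem_cons.mp h with
        | inl h' => exact absurd h'.symm hc
        | inr h' => exact h'
      obtain ⟨u, v, he, hu⟩ := ih hm
      refine ⟨c :: u, v, by simp [he], ?_⟩
      simp only [List.mem_cons, not_or]
      exact ⟨fun h' => hc h'.symm, hu⟩

theorem pvGo_colon (u : List Char) : ∀ (v : List Char) (fuel : Nat) (cur : List Char)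
    (acc : List (List Char)), ':' ∉ u → u.length < fuel →
    PySem.Chars.splitOnMax.go [':'] fuel 1 (u ++ ':' :: v) cur acc
      = acc.reverse ++ [cur.reverse ++ u, v] := by
  induction u with
  | nil =>
    intro v fuel cur acc _ hf
    obtain ⟨f, rfl⟩ := Nat.exists_eq_succ_of_ne_zero (by omega : fuel ≠ 0)
    cases f with
    | zero =>
      cases v with
      | nil => simp [PySem.Chars.splitOnMax.go]
      | cons a w => simp [PySem.Chars.splitOnMax.go]
    | succ f' =>
      cases v with
      | nil => simp [PySem.Chars.splitOnMax.go]
      | cons a w => simp [PySem.Chars.splitOnMax.go]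
  | cons c u' ih =>
    intro v fuel cur acc hu hf
    obtain ⟨f, rfl⟩ := Nat.exists_eq_succ_of_ne_zero (by omega : fuel ≠ 0)
    have hc : c ≠ ':' := fun h => hu (by simp [h])
    have step : PySem.Chars.splitOnMax.go [':'] (f+1) 1 ((c :: u') ++ ':' :: v) cur acc
        = PySem.Chars.splitOnMax.go [':'] f 1 (u' ++ ':' :: v) (c :: cur) acc := by
      simp [PySem.Chars.splitOnMax.go]
      exact fun h => absurd h.symm hc
    rw [step, ih v f (c :: cur) acc (fun h => hu (by simp [h])) (by simp at hf ⊢; omega)]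
    simp

theorem pvSplitOnMax_colon {u v : List Char} (hu : ':' ∉ u) :
    PySem.Chars.splitOnMax (u ++ ':' :: v) [':'] 1 = [u, v] := by
  unfold PySem.Chars.splitOnMax
  rw [if_neg (by omega : ¬ (1 : Int) < 0)]
  simp only [Int.toNat_one]
  rw [pvGo_colon u v _ [] [] hu (by simp)]
  simp

theorem pvPrefix_colon (p : List Char) : ∀ (u v : List Char), ':' ∉ p → ':' ∉ u →
    ((p ++ [':']) <+: (u ++ ':' :: v) ↔ u = p) := by
  induction p with
  | nil =>
    intro u v _ hu
    cases u with
    | nil => simp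
    | cons c u' =>
      simp only [List.nil_append, List.cons_append, List.cons_prefix_cons]
      constructor
      · rintro ⟨h, -⟩; exact absurd h.symm (fun h' => hu (by simp [h']))
      · intro h; cases h
  | cons a p' ih =>
    intro u v hp hu
    have ha : a ≠ ':' := fun h => hp (by simp [h])
    cases u with
    | nil =>
      simp only [List.nil_append, List.cons_append, List.cons_prefix_cons]
      constructor
      · rintro ⟨h, -⟩; exact absurd h ha
      · intro h; cases h
    | cons c u' =>
      simp only [List.cons_append, List.cons_prefix_cons, List.cons.injEq]
      rw [ih u' v (fun h => hp (by simp [h])) (fun h => hu (by simp [h]))]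
      constructor
      · rintro ⟨h1, h2⟩; exact ⟨h1.symm, h2⟩
      · rintro ⟨h1, h2⟩; exact ⟨h1.symm, h2⟩

-- startswith on the lowered line, for a lowercase colon-free keyword p
theorem pvStartswith_key {u v p : List Char} (hu : ':' ∉ u) (hp : ':' ∉ p) :
    (PySem.Chars.startswith (PySem.Chars.lower (u ++ ':' :: v)) (p ++ [':']) = true
      ↔ PySem.Chars.lower u = p) := by
  unfold PySem.Chars.startswith
  rw [List.isPrefixOf_iff_prefix]
  have hlow : PySem.Chars.lower (u ++ ':' :: v)
      = PySem.Chars.lower u ++ ':' :: PySem.Chars.lower v := by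
    unfold PySem.Chars.lower
    simp [PySem.Chars.lowerChar, PySem.Chars.isupper]
  rw [hlow]
  exact pvPrefix_colon p (PySem.Chars.lower u) (PySem.Chars.lower v) hp
    (fun h => hu (pvColon_mem_lower.mp h))

-- one loop step preserves the relation between A's pair and B's dict
theorem pvStep_inv (st : Option String × Option String) (d : PySem.Dict String String)
    (raw : String)
    (h1 : d.get? "name" = st.1) (h2 : d.get? "background" = st.2) :
    (pvStepB d raw).get? "name" = (pvStepA st raw).1
      ∧ (pvStepB d raw).get? "background" = (pvStepA st raw).2 := by
  unfold pvStepA pvStepB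
  by_cases he : PySem.Str.strip raw = ""
  · simp [he, h1, h2]
  · rw [if_neg he, if_neg he]
    by_cases hcol : (':' : Char) ∈ (PySem.Str.strip raw).toList
    · -- a colon exists: decompose the line at its first colon
      obtain ⟨u, v, heq, hu⟩ := pvSplit_first hcol
      have hisin : PySem.Str.isIn ":" (PySem.Str.strip raw) = true := by
        unfold PySem.Str.isIn
        rw [PySem.Chars.isIn_iff_infix]
        exact (List.singleton_infix_iff _ _).mpr hcol
      rw [hisin]
      simp only [Bool.true_eq_false, if_false]
      have hsplit : (PySem.Str.splitMax? (PySem.Str.strip raw) ":" 1).getD []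
          = [String.ofList u, String.ofList v] := by
        unfold PySem.Str.splitMax? PySem.Chars.splitMax?
        rw [show (":" : String).toList = [':'] from rfl]
        simp only [List.isEmpty_cons]
        rw [heq, pvSplitOnMax_colon hu]
        simp
      rw [hsplit]
      have hname : PySem.Str.startswith (PySem.Str.lower (PySem.Str.strip raw)) "name:" = true
          ↔ PySem.Chars.lower u = "name".toList := by
        unfold PySem.Str.startswith PySem.Str.lower
        rw [String.toList_ofList, heq,
          show ("name:" : String).toList = "name".toList ++ [':'] by decide]
        exact pvStartswith_key hu (by decide)
      have hbg : PySem.Str.startswith (PySem.Str.lower (PySem.Str.strip raw)) "background:" = true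
          ↔ PySem.Chars.lower u = "background".toList := by
        unfold PySem.Str.startswith PySem.Str.lower
        rw [String.toList_ofList, heq,
          show ("background:" : String).toList = "background".toList ++ [':'] by decide]
        exact pvStartswith_key hu (by decide)
      have hkey : PySem.Str.lower ((PySem.List.pyGet? [String.ofList u, String.ofList v] 0).getD "")
          = String.ofList (PySem.Chars.lower u) := by
        simp [PySem.List.pyGet?, PySem.List.pyIdx?, PySem.Str.lower]
      simp only [PySem.List.pyGet?, PySem.List.pyIdx?] at hkey ⊢
      by_cases hn : PySem.Chars.lower u = "name".toList
      · rw [if_pos (hname.mpr hn)]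
        have : String.ofList (PySem.Chars.lower u) = "name" := by
          rw [hn]; exact String.toList_inj.mp (by simp)
        simp only [hkey, this]
        constructor
        · simp [PySem.Dict.get?_insert_self]
        · rw [PySem.Dict.get?_insert_of_ne _ _ (by decide)]
          exact h2
      · rw [if_neg (fun h => hn (hname.mp h))]
        by_cases hb : PySem.Chars.lower u = "background".toList
        · rw [if_pos (hbg.mpr hb)]
          have : String.ofList (PySem.Chars.lower u) = "background" := by
            rw [hb]; exact String.toList_inj.mp (by simp)
          simp only [hkey, this]
          constructor
          · rw [PySem.Dict.get?_insert_of_ne _ _ (by decide)]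
            exact h1
          · simp [PySem.Dict.get?_insert_self]
        · rw [if_neg (fun h => hb (hbg.mp h))]
          have hkn : String.ofList (PySem.Chars.lower u) ≠ "name" := by
            intro h; exact hn (by simpa using congrArg String.toList h)
          have hkb : String.ofList (PySem.Chars.lower u) ≠ "background" := by
            intro h; exact hb (by simpa using congrArg String.toList h)
          rw [hkey]
          constructor
          · rw [PySem.Dict.get?_insert_of_ne _ _ (Ne.symm hkn)]; exact h1
          · rw [PySem.Dict.get?_insert_of_ne _ _ (Ne.symm hkb)]; exact h2
    · -- no colon: B skips; A's startswith tests are both false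
      have hisin : PySem.Str.isIn ":" (PySem.Str.strip raw) = false := by
        unfold PySem.Str.isIn
        rw [PySem.Chars.isIn_eq_false_iff]
        intro h
        exact hcol ((List.singleton_infix_iff _ _).mp h)
      rw [hisin]
      have hno : ∀ p : List Char, PySem.Chars.startswith
          (PySem.Chars.lower (PySem.Str.strip raw).toList) (p ++ [':']) = false := by
        intro p
        rw [Bool.eq_false_iff]
        intro h
        unfold PySem.Chars.startswith at h
        rw [List.isPrefixOf_iff_prefix] at h
        have : (':' : Char) ∈ PySem.Chars.lower (PySem.Str.strip raw).toList :=
          h.subset (by simp)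
        exact hcol (pvColon_mem_lower.mp this)
      have hnS : PySem.Str.startswith (PySem.Str.lower (PySem.Str.strip raw)) "name:" = false := by
        unfold PySem.Str.startswith PySem.Str.lower
        rw [String.toList_ofList,
          show ("name:" : String).toList = "name".toList ++ [':'] by decide]
        exact hno "name".toList
      have hbS : PySem.Str.startswith (PySem.Str.lower (PySem.Str.strip raw)) "background:" = false := by
        unfold PySem.Str.startswith PySem.Str.lower
        rw [String.toList_ofList,
          show ("background:" : String).toList = "background".toList ++ [':'] by decide]
        exact hno "background".toList
      simp only [hnS, hbS]
      simp [h1, h2]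

theorem pvLoop_inv (bl : List String) : ∀ (st : Option String × Option String)
    (d : PySem.Dict String String),
    d.get? "name" = st.1 → d.get? "background" = st.2 →
    (bl.foldl pvStepB d).get? "name" = (bl.foldl pvStepA st).1
      ∧ (bl.foldl pvStepB d).get? "background" = (bl.foldl pvStepA st).2 := by
  induction bl with
  | nil => intro st d h1 h2; exact ⟨h1, h2⟩
  | cons raw rest ih =>
    intro st d h1 h2
    obtain ⟨g1, g2⟩ := pvStep_inv st d raw h1 h2
    exact ih _ _ g1 g2

-- ===== VERDICT (by name: the statement is the Claim_ definition above) =====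
theorem parse_block_block_py_spec : Claim_equal_parse_block_block_py := by
  intro block_lines index _
  unfold Spec_parse_block_block_py parse_block_block_py parse_block_block_py_alt
  obtain ⟨h1, h2⟩ := pvLoop_inv block_lines (none, none) PySem.Dict.empty (by rfl) (by rfl)
  simp only [h1, h2]
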